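-- pv_equiv track=rewrite | github.com/carsonmagnuson/advent-of-code | 2017/9/nine.py | both_parts
-- ===== SOURCE A (Python) =====
-- def both_parts(line):
--     score = 0
--     current_value = 1
--     trash = False
--     index = 0
--     non_trash_count = 0
--     while index < len(line) - 1:
--         if not trash:
--             if line[index] == '{':
--                 score += current_value
--                 current_value += 1
--             elif line[index] == '}': current_value -= 1
--             elif line[index] == '<': trash = True
--             elif line[index] == '!': index += 1
--         elif line[index] == '>': trash = False
--         elif line[index] == '!':
--             index += 2
--             continue
--         else: non_trash_count += 1
--         index += 1
--     return (score, non_trash_count)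
-- ===== SOURCE B (Python) =====
-- def both_parts(line):
--     # Phase 1: drop the final character, then delete every escape pair: an
--     # exclamation mark plus the character after it (a lone trailing one is dropped).
--     s = line[:-1]
--     cleaned = []
--     i = 0
--     while i < len(s):
--         if s[i] == '!':
--             i += 2
--         else:
--             cleaned.append(s[i])
--             i += 1
--     rest = ''.join(cleaned)
--     # Phase 2: excise garbage regions (an opening angle bracket up to the first
--     # closing one; unclosed garbage runs to the end), counting interior characters.
--     kept = []
--     non_trash_count = 0
--     i = 0
--     n = len(rest)
--     while i < n:
--         c = rest[i]
--         if c == '<':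
--             j = rest.find('>', i + 1)
--             if j == -1:
--                 non_trash_count += n - (i + 1)
--                 i = n
--             else:
--                 non_trash_count += j - (i + 1)
--                 i = j + 1
--         else:
--             kept.append(c)
--             i += 1
--     # Phase 3: depth scan over what is left, scoring the groups.
--     score = 0
--     current_value = 1
--     for c in kept:
--         if c == '{':
--             score += current_value
--             current_value += 1
--         elif c == '}':
--             current_value -= 1
--     return (score, non_trash_count)
-- ===== Notes on version B (the rewrite author's own statement) =====
-- stated objective: alternative
-- what changed: Replaces A's single stateful while-loop (trash flag, manual index skipping of escapes) by a three-phase pipeline: first delete all escape pairs, then excise each garbage region up to its first closing bracket while summing interior lengths, then a plain depth scan over the remaining characters to accumulate the score.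
import Mathlib
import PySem

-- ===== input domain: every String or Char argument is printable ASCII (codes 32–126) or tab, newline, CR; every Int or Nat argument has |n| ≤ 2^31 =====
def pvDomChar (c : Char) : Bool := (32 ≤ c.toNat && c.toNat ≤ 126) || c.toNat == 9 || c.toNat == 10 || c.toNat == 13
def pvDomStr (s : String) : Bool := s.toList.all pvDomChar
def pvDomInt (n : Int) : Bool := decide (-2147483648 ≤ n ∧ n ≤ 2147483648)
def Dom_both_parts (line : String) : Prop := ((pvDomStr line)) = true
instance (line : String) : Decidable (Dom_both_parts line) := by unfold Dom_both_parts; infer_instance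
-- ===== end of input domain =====

-- B replaces A's single stateful scan by three passes (strip escapes, excise garbage
-- regions, depth-scan the remainder); objective: alternative decomposition, same cost.

-- ===== PORT A =====
-- A's while-loop over line[:-1] (index < len(line)-1); index increments of 1 resp. 2
-- become consuming the head resp. the head plus rest.tail of the remaining characters.
def aLoop : List Char → Bool → Int → Int → Int → Int × Int
  | [], _, score, _, ntc => (score, ntc)
  | c :: rest, trash, score, cv, ntc =>
    if trash = false then
      if c = '{' then aLoop rest trash (score + cv) (cv + 1) ntc
      else if c = '}' then aLoop rest trash score (cv - 1) ntc
      else if c = '<' then aLoop rest true score cv ntc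
      else if c = '!' then aLoop rest.tail trash score cv ntc
      else aLoop rest trash score cv ntc
    else if c = '>' then aLoop rest false score cv ntc
    else if c = '!' then aLoop rest.tail trash score cv ntc
    else aLoop rest trash score cv (ntc + 1)
termination_by cs _ _ _ _ => cs.length
decreasing_by all_goals simp [List.length_tail]

def both_parts (line : String) : Int × Int :=
  aLoop line.toList.dropLast false 0 1 0

-- ===== PORT B =====
-- Phase 1: delete escape pairs '!x' (a lone trailing '!' is dropped).
def cleanEsc : List Char → List Char
  | [] => []
  | c :: rest => if c = '!' then cleanEsc rest.tail else c :: cleanEsc rest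
termination_by cs => cs.length
decreasing_by all_goals simp [List.length_tail]

-- Phase 2: excise garbage regions, counting interior characters; the index-jump
-- to the first closing bracket (rest.find) is ported as takeWhile/dropWhile.
def gSplit : List Char → List Char × Int
  | [] => ([], 0)
  | c :: rest =>
    if c = '<' then
      let inside := rest.takeWhile (fun x => x ≠ '>')
      let r2 := rest.dropWhile (fun x => x ≠ '>')
      if r2.isEmpty then ([], (inside.length : Int))
      else ((gSplit r2.tail).1, (inside.length : Int) + (gSplit r2.tail).2)
    else ((c :: (gSplit rest).1), (gSplit rest).2)
termination_by cs => cs.length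
decreasing_by all_goals
  have h1 := List.length_dropWhile_le (fun x => !decide (x = '>')) rest
  simp [List.length_tail] at * <;> omega

-- Phase 3: depth scan over the kept characters.
def depthStep (p : Int × Int) (c : Char) : Int × Int :=
  if c = '{' then (p.1 + p.2, p.2 + 1)
  else if c = '}' then (p.1, p.2 - 1)
  else p

def both_parts_alt (line : String) : Int × Int :=
  let cleaned := cleanEsc line.toList.dropLast
  (((gSplit cleaned).1.foldl depthStep (0, 1)).1, (gSplit cleaned).2)

-- ===== PRECONDITION & SPEC =====
def Spec_both_parts (line : String) (out : Int × Int) : Prop := out = both_parts_alt line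
instance (line : String) (out : Int × Int) : Decidable (Spec_both_parts line out) := by unfold Spec_both_parts; infer_instance

-- ===== CLAIM (what is proved, stated in full; the proofs are below) =====
def Claim_equal_both_parts : Prop := ∀ (line : String), Dom_both_parts line → Spec_both_parts line (both_parts line)

-- ===== LEMMAS AND PROOFS =====

-- B's value on an already-cleaned character list, from general state (outside garbage).
def bOut (cl : List Char) (s c n : Int) : Int × Int :=
  (((gSplit cl).1.foldl depthStep (s, c)).1, n + (gSplit cl).2)

-- B's value when the scan is currently inside garbage.
def bGarb (cl : List Char) (s c n : Int) : Int × Int :=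
  let inside := cl.takeWhile (fun x => x ≠ '>')
  let r2 := cl.dropWhile (fun x => x ≠ '>')
  if r2.isEmpty then (s, n + (inside.length : Int))
  else bOut r2.tail s c (n + (inside.length : Int))

lemma bOut_open (cl : List Char) (s c n : Int) :
    bOut ('<' :: cl) s c n = bGarb cl s c n := by
  simp only [bOut, bGarb, gSplit]
  split_ifs with h <;> simp <;> omega

lemma bOut_other (d : Char) (cl : List Char) (s c n : Int) (h : d ≠ '<') :
    bOut (d :: cl) s c n = bOut cl ((depthStep (s, c) d).1) ((depthStep (s, c) d).2) n := by
  simp [bOut, gSplit, h]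

lemma bGarb_close (cl : List Char) (s c n : Int) :
    bGarb ('>' :: cl) s c n = bOut cl s c n := by
  simp [bGarb, List.dropWhile, List.takeWhile]

lemma bGarb_other (d : Char) (cl : List Char) (s c n : Int) (h : d ≠ '>') :
    bGarb (d :: cl) s c n = bGarb cl s c (n + 1) := by
  have h1 : List.dropWhile (fun x => x ≠ '>') (d :: cl) = List.dropWhile (fun x => x ≠ '>') cl := by
    simp [List.dropWhile, h]
  have h2 : (List.takeWhile (fun x => x ≠ '>') (d :: cl)).length
      = (List.takeWhile (fun x => x ≠ '>') cl).length + 1 := by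
    simp [List.takeWhile, h]
  simp only [bGarb, h1, h2]
  split_ifs <;> simp [bOut] <;> omega

lemma main_sim : ∀ (k : Nat) (cs : List Char), cs.length ≤ k →
    (∀ s c n, aLoop cs false s c n = bOut (cleanEsc cs) s c n) ∧
    (∀ s c n, aLoop cs true s c n = bGarb (cleanEsc cs) s c n) := by
  intro k
  induction k with
  | zero =>
    intro cs h
    have : cs = [] := List.eq_nil_of_length_eq_zero (Nat.le_zero.mp h)
    subst this
    constructor <;> intro s c n <;> simp [aLoop, cleanEsc, bOut, bGarb, gSplit]
  | succ k ih =>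
    intro cs h
    match cs with
    | [] =>
      constructor <;> intro s c n <;> simp [aLoop, cleanEsc, bOut, bGarb, gSplit]
    | d :: rest =>
      have hr : rest.length ≤ k := by simp at h; omega
      have ht : rest.tail.length ≤ k := by
        have := List.length_tail (l := rest); omega
      constructor
      · intro s c n
        by_cases h1 : d = '{'
        · subst h1
          rw [show aLoop ('{' :: rest) false s c n = aLoop rest false (s + c) (c + 1) n by
            simp [aLoop]]
          rw [(ih rest hr).1, show cleanEsc ('{' :: rest) = '{' :: cleanEsc rest by simp [cleanEsc]]
          rw [bOut_other '{' _ _ _ _ (by decide)]; simp [depthStep]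
        · by_cases h2 : d = '}'
          · subst h2
            rw [show aLoop ('}' :: rest) false s c n = aLoop rest false s (c - 1) n by
              simp [aLoop]]
            rw [(ih rest hr).1, show cleanEsc ('}' :: rest) = '}' :: cleanEsc rest by simp [cleanEsc]]
            rw [bOut_other '}' _ _ _ _ (by decide)]; simp [depthStep]
          · by_cases h3 : d = '<'
            · subst h3
              rw [show aLoop ('<' :: rest) false s c n = aLoop rest true s c n by simp [aLoop]]
              rw [(ih rest hr).2, show cleanEsc ('<' :: rest) = '<' :: cleanEsc rest by simp [cleanEsc]]
              rw [bOut_open]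
            · by_cases h4 : d = '!'
              · subst h4
                rw [show aLoop ('!' :: rest) false s c n = aLoop rest.tail false s c n by
                  simp [aLoop]]
                rw [(ih rest.tail ht).1,
                  show cleanEsc ('!' :: rest) = cleanEsc rest.tail by simp [cleanEsc]]
              · rw [show aLoop (d :: rest) false s c n = aLoop rest false s c n by
                  simp [aLoop, h1, h2, h3, h4]]
                rw [(ih rest hr).1,
                  show cleanEsc (d :: rest) = d :: cleanEsc rest by simp [cleanEsc, h4]]
                rw [bOut_other d _ _ _ _ h3]; simp [depthStep, h1, h2]
      · intro s c n
        by_cases h1 : d = '>'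
        · subst h1
          rw [show aLoop ('>' :: rest) true s c n = aLoop rest false s c n by simp [aLoop]]
          rw [(ih rest hr).1, show cleanEsc ('>' :: rest) = '>' :: cleanEsc rest by simp [cleanEsc]]
          rw [bGarb_close]
        · by_cases h2 : d = '!'
          · subst h2
            rw [show aLoop ('!' :: rest) true s c n = aLoop rest.tail true s c n by simp [aLoop]]
            rw [(ih rest.tail ht).2,
              show cleanEsc ('!' :: rest) = cleanEsc rest.tail by simp [cleanEsc]]
          · rw [show aLoop (d :: rest) true s c n = aLoop rest true s c (n + 1) by
              simp [aLoop, h1, h2]]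
            rw [(ih rest hr).2,
              show cleanEsc (d :: rest) = d :: cleanEsc rest by simp [cleanEsc, h2]]
            rw [bGarb_other d _ _ _ _ h1]

-- ===== VERDICT (by name: the statement is the Claim_ definition above) =====
theorem both_parts_spec : Claim_equal_both_parts := by
  intro line _
  unfold Spec_both_parts both_parts both_parts_alt
  rw [(main_sim line.toList.dropLast.length line.toList.dropLast le_rfl).1]
  simp [bOut]
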